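-- pv_equiv track=rewrite | github.com/MiniLogging/BloxdLogging | chunkSaver.py | extract_data_between_quotes
-- ===== SOURCE A (Python) =====
-- def extract_data_between_quotes(lines):
--     result = []
--     for line in lines:
--         start = line.find('"')
--         end = line.rfind('"')
--         if start != -1 and end != -1 and start != end:
--             result.append(line[start + 1:end])
--     return result
-- ===== SOURCE B (Python) =====
-- def extract_data_between_quotes(lines):
--     result = []
--     for line in lines:
--         parts = line.split('"')
--         if len(parts) >= 3:
--             result.append('"'.join(parts[1:-1]))
--     return result
-- ===== Notes on version B (the rewrite author's own statement) =====
-- stated objective: idiomatic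
-- what changed: Replaces the find/rfind boundary-index scan and slice with delimiter tokenization: each line is split on '"' and the inner tokens are rejoined (one C-level split instead of two scans plus a slice).
import Mathlib
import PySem

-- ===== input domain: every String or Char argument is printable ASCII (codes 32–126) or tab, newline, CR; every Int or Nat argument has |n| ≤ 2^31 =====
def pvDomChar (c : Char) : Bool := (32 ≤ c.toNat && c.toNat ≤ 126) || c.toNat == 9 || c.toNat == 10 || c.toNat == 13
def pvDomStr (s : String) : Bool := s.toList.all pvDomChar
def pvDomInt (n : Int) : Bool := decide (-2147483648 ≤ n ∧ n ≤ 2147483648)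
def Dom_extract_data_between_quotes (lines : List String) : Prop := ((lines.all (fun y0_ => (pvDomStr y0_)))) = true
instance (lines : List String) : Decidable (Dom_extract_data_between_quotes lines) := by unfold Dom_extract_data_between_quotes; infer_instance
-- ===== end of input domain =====

-- B replaces A's find/rfind boundary-index scan with delimiter tokenization (split on '"', rejoin the inner tokens); same cost, more idiomatic.

-- ===== PORT A =====
def extract_data_between_quotes (lines : List String) : List String :=
  lines.foldl (fun result line =>
    let start := PySem.Str.find line "\""
    let stop := PySem.Str.rfind line "\""
    if start ≠ -1 ∧ stop ≠ -1 ∧ start ≠ stop then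
      result ++ [PySem.Str.slice line (some (start + 1)) (some stop)]
    else result) []

-- ===== PORT B =====
def extract_data_between_quotes_alt (lines : List String) : List String :=
  lines.foldl (fun result line =>
    let parts := PySem.Chars.splitOn line.toList ['"']   -- line.split('"')
    if 3 ≤ parts.length then
      result ++ [String.ofList (PySem.Chars.join ['"'] (PySem.List.slice parts (some 1) (some (-1))))]  -- '"'.join(parts[1:-1])
    else result) []

-- ===== PRECONDITION & SPEC =====
def Spec_extract_data_between_quotes (lines : List String) (out : List String) : Prop := out = extract_data_between_quotes_alt lines
instance (lines : List String) (out : List String) : Decidable (Spec_extract_data_between_quotes lines out) := by unfold Spec_extract_data_between_quotes; infer_instance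

-- ===== CLAIM (what is proved, stated in full; the proofs are below) =====
def Claim_equal_extract_data_between_quotes : Prop := ∀ (lines : List String), Dom_extract_data_between_quotes lines → Spec_extract_data_between_quotes lines (extract_data_between_quotes lines)

-- ===== LEMMAS AND PROOFS =====

def qsplit : List Char → List (List Char)
  | [] => [[]]
  | a :: t => if a = '"' then [] :: qsplit t else (qsplit t).modifyHead (a :: ·)
theorem qsplit_ne_nil (s : List Char) : qsplit s ≠ [] := by
  induction s with
  | nil => simp [qsplit]
  | cons a t ih =>
    simp only [qsplit]
    split_ifs
    · simp
    · cases h : qsplit t with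
      | nil => exact absurd h ih
      | cons x xs => simp
theorem qsplit_append_free {p : List Char} (h : '"' ∉ p) (rest : List Char) :
    qsplit (p ++ rest) = (qsplit rest).modifyHead (p ++ ·) := by
  induction p with
  | nil =>
    cases hq : qsplit rest with
    | nil => exact absurd hq (qsplit_ne_nil rest)
    | cons x xs => simp [hq, List.modifyHead]
  | cons a p ih =>
    have ha : a ≠ '"' := fun he => h (by simp [he])
    have hp : '"' ∉ p := fun hm => h (by simp [hm])
    rw [List.cons_append]
    simp only [qsplit, if_neg (by exact ha), ih hp]
    cases hq : qsplit rest with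
    | nil => exact absurd hq (qsplit_ne_nil rest)
    | cons x xs => simp [List.modifyHead]
theorem qsplit_free {p : List Char} (h : '"' ∉ p) : qsplit p = [p] := by
  rw [show p = p ++ [] by simp, qsplit_append_free h []]
  simp [qsplit, List.modifyHead]
theorem qsplit_append_quote {q : List Char} (h : '"' ∉ q) (z : List Char) :
    qsplit (z ++ '"' :: q) = qsplit z ++ [q] := by
  induction z with
  | nil => simp [qsplit, qsplit_free h]
  | cons a z ih =>
    rw [List.cons_append]
    by_cases ha : a = '"'
    · subst ha; simp [qsplit, ih]
    · simp only [qsplit, if_neg ha, ih]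
      cases hz : qsplit z with
      | nil => exact absurd hz (qsplit_ne_nil z)
      | cons x xs => simp [List.modifyHead]
theorem join_qsplit (s : List Char) : PySem.Chars.join ['"'] (qsplit s) = s := by
  induction s with
  | nil => simp [qsplit, PySem.Chars.join_singleton]
  | cons a t ih =>
    cases ht : qsplit t with
    | nil => exact absurd ht (qsplit_ne_nil t)
    | cons x xs =>
      rw [ht] at ih
      by_cases ha : a = '"'
      · subst ha
        rw [show qsplit ('"' :: t) = [] :: x :: xs by simp [qsplit, ht],
          PySem.Chars.join_cons_cons, ih]
        simp
      · simp only [qsplit, if_neg ha, ht, List.modifyHead]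
        cases xs with
        | nil => simp only [PySem.Chars.join_singleton] at ih ⊢; rw [ih]
        | cons y ys =>
          simp only [PySem.Chars.join_cons_cons] at ih ⊢
          rw [List.cons_append, List.cons_append, ih]

theorem splitOn_go_eq (l : List Char) : ∀ (fuel : Nat) (cur : List Char) (acc : List (List Char)),
    l.length ≤ fuel →
    PySem.Chars.splitOn.go ['"'] fuel l cur acc
      = acc.reverse ++ ((qsplit l).modifyHead (cur.reverse ++ ·)) := by
  induction l with
  | nil =>
    intro fuel cur acc _
    cases fuel <;> simp [PySem.Chars.splitOn.go, qsplit]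
  | cons c rest ih =>
    intro fuel cur acc hf
    cases fuel with
    | zero => simp at hf
    | succ f =>
      rw [PySem.Chars.splitOn.go]
      have hrest : rest.length ≤ f := by simpa using hf
      by_cases hc : c = '"'
      · subst hc
        have hpre : List.isPrefixOf ['"'] ('"' :: rest) = true := by simp [List.isPrefixOf]
        rw [if_pos hpre, show List.drop ['"'].length ('"' :: rest) = rest by simp,
          ih f [] (cur.reverse :: acc) hrest]
        cases h : qsplit rest with
        | nil => exact absurd h (qsplit_ne_nil rest)
        | cons x xs => simp [qsplit, h, List.modifyHead]
      · have hpre : List.isPrefixOf ['"'] (c :: rest) = false := by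
          simp [List.isPrefixOf]; exact fun h => absurd h.symm hc
        rw [if_neg (by simp [hpre]), ih f (c :: cur) acc hrest]
        cases h : qsplit rest with
        | nil => exact absurd h (qsplit_ne_nil rest)
        | cons x xs => simp [qsplit, hc, h, List.modifyHead]

theorem splitOn_eq_qsplit (s : List Char) : PySem.Chars.splitOn s ['"'] = qsplit s := by
  rw [PySem.Chars.splitOn, splitOn_go_eq s (s.length + 1) [] [] (by omega)]
  cases h : qsplit s with
  | nil => exact absurd h (qsplit_ne_nil s)
  | cons x xs => simp [List.modifyHead]

theorem prefix_at {s : List Char} {k : Nat} (hk : s[k]? = some '"') :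
    ['"'].isPrefixOf (s.drop k) = true := by
  cases hd : s.drop k with
  | nil => rw [← List.head?_drop, hd] at hk; simp at hk
  | cons a t =>
    rw [← List.head?_drop, hd] at hk
    simp at hk
    simp [List.isPrefixOf, hk]
theorem not_prefix_at {s : List Char} {k : Nat} (hk : s[k]? ≠ some '"') :
    ['"'].isPrefixOf (s.drop k) = false := by
  cases hd : s.drop k with
  | nil => simp [List.isPrefixOf]
  | cons a t =>
    have : s[k]? = some a := by rw [← List.head?_drop, hd]; rfl
    rw [this] at hk
    simp [List.isPrefixOf]
    intro he; exact absurd (congrArg some he.symm) hk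
theorem find_go_free {p : List Char} (h : '"' ∉ p) : ∀ k, PySem.Chars.find.go ['"'] p k = -1 := by
  induction p with
  | nil => intro k; simp [PySem.Chars.find.go]
  | cons a p ih =>
    intro k
    have ha : a ≠ '"' := fun he => h (by simp [he])
    rw [PySem.Chars.find.go]
    rw [if_neg (by simp [List.isPrefixOf]; exact fun he => absurd he.symm ha)]
    exact ih (fun hm => h (by simp [hm])) (k+1)
theorem find_go_append {p : List Char} (h : '"' ∉ p) (t : List Char) :
    ∀ k : Nat, PySem.Chars.find.go ['"'] (p ++ '"' :: t) k = (k : Int) + p.length := by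
  induction p with
  | nil =>
    intro k
    rw [List.nil_append, PySem.Chars.find.go, if_pos (by simp [List.isPrefixOf])]
    simp
  | cons a p ih =>
    intro k
    have ha : a ≠ '"' := fun he => h (by simp [he])
    rw [List.cons_append, PySem.Chars.find.go]
    rw [if_neg (by simp [List.isPrefixOf]; exact fun he => absurd he.symm ha)]
    rw [ih (fun hm => h (by simp [hm])) (k+1)]
    push_cast [List.length_cons]
    ring
theorem rfind_go_found (s : List Char) (i : Nat) (hi : s[i]? = some '"') :
    ∀ j : Nat, i ≤ j →
    (∀ k : Nat, i < k → k ≤ j → s[k]? ≠ some '"') →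
    PySem.Chars.rfind.go s ['"'] j = (i : Int) := by
  intro j
  induction j with
  | zero =>
    intro hij _
    interval_cases i
    rw [PySem.Chars.rfind.go]
    have := prefix_at hi
    simp only [List.drop_zero] at this
    rw [this]
    simp
  | succ j ih =>
    intro hij h
    rw [PySem.Chars.rfind.go]
    by_cases he : i = j + 1
    · rw [if_pos (by rw [← he]; exact prefix_at hi)]
      simp [he]
    · rw [not_prefix_at (h (j+1) (by omega) (le_refl _))]
      simp only [Bool.false_eq_true, if_false]
      exact ih (by omega) (fun k h1 h2 => h k h1 (by omega))

theorem exists_split_first {s : List Char} (h : '"' ∈ s) :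
    ∃ p t, s = p ++ '"' :: t ∧ '"' ∉ p := by
  induction s with
  | nil => simp at h
  | cons a s ih =>
    by_cases ha : a = '"'
    · exact ⟨[], s, by simp [ha], by simp⟩
    · have : '"' ∈ s := by
        rcases List.mem_cons.mp h with h1 | h1
        · exact absurd h1.symm ha
        · exact h1
      obtain ⟨p, t, he, hp⟩ := ih this
      exact ⟨a :: p, t, by simp [he], by
        intro hm
        rcases List.mem_cons.mp hm with h1 | h1
        · exact ha h1.symm
        · exact hp h1⟩
theorem exists_split_last {s : List Char} (h : '"' ∈ s) :
    ∃ z q, s = z ++ '"' :: q ∧ '"' ∉ q := by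
  have h' : '"' ∈ s.reverse := by simpa using h
  obtain ⟨p, t, he, hp⟩ := exists_split_first h'
  refine ⟨t.reverse, p.reverse, ?_, by simpa using hp⟩
  have := congrArg List.reverse he
  simpa using this
theorem slice_one_neg_one {α : Type} (a b : α) (ys : List α) :
    PySem.List.slice (a :: (ys ++ [b])) (some 1) (some (-1)) = ys := by
  simp only [PySem.List.slice, PySem.List.clampIdx]
  have h1 : ¬((ys.length : Int) + 1 < 0) := by omega
  simp [h1]
theorem getElem?_ne_quote {t : List Char} (h : '"' ∉ t) (n : Nat) : t[n]? ≠ some '"' := by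
  cases hx : t[n]? with
  | none => simp
  | some a =>
    have ha : a ∈ t := List.mem_of_getElem? hx
    intro hc
    simp at hc
    exact h (hc ▸ ha)

theorem line_eq (acc : List String) (line : String) :
    (let start := PySem.Str.find line "\""
     let stop := PySem.Str.rfind line "\""
     if start ≠ -1 ∧ stop ≠ -1 ∧ start ≠ stop then
       acc ++ [PySem.Str.slice line (some (start + 1)) (some stop)]
     else acc)
    = (let parts := PySem.Chars.splitOn line.toList ['"']
       if 3 ≤ parts.length then
         acc ++ [String.ofList (PySem.Chars.join ['"'] (PySem.List.slice parts (some 1) (some (-1))))]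
       else acc) := by
  simp only [PySem.Str.find, PySem.Str.rfind, PySem.Str.slice, splitOn_eq_qsplit,
    show ("\"" : String).toList = ['"'] from rfl]
  generalize line.toList = s
  rw [PySem.Chars.find, PySem.Chars.rfind]
  by_cases h1 : '"' ∈ s
  · obtain ⟨p, t, rfl, hp⟩ := exists_split_first h1
    have hip : ∀ k : Nat, p.length < k → (p ++ '"' :: t)[k]? = t[k - p.length - 1]? := by
      intro k hk
      rw [List.getElem?_append_right (by omega)]
      have h3 : k - p.length = (k - p.length - 1) + 1 := by omega
      rw [h3, List.getElem?_cons_succ]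
      congr 1
    by_cases h2 : '"' ∈ t
    · obtain ⟨m, q, rfl, hq2⟩ := exists_split_last h2
      have hf : PySem.Chars.find.go ['"'] (p ++ '"' :: (m ++ '"' :: q)) 0 = (p.length : Int) := by
        rw [find_go_append hp _ 0]; simp
      have hi : (p ++ '"' :: (m ++ '"' :: q))[p.length + 1 + m.length]? = some '"' := by
        have hs2 : p ++ '"' :: (m ++ '"' :: q) = (p ++ '"' :: m) ++ '"' :: q := by simp
        rw [hs2, List.getElem?_append_right (by simp; omega)]
        simp only [List.length_append, List.length_cons]
        rw [show p.length + 1 + m.length - (p.length + (m.length + 1)) = 0 from by omega]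
        rfl
      have hr : PySem.Chars.rfind.go (p ++ '"' :: (m ++ '"' :: q)) ['"']
          (p ++ '"' :: (m ++ '"' :: q)).length = ((p.length + 1 + m.length : Nat) : Int) := by
        apply rfind_go_found _ _ hi
        · simp; omega
        · intro k hk1 hk2
          rw [hip k (by omega)]
          have : k - p.length - 1 - m.length = (k - p.length - 1 - m.length - 1) + 1 := by
            simp at hk2; omega
          rw [List.getElem?_append_right (by omega), this, List.getElem?_cons_succ]
          exact getElem?_ne_quote hq2 _
      rw [hf, hr]
      rw [if_pos (by refine ⟨by omega, by omega, by push_cast; omega⟩)]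
      have hqs : qsplit (p ++ '"' :: (m ++ '"' :: q)) = p :: (qsplit m ++ [q]) := by
        rw [qsplit_append_free hp, show qsplit ('"' :: (m ++ '"' :: q))
            = [] :: qsplit (m ++ '"' :: q) from by simp [qsplit],
          qsplit_append_quote hq2 m]
        simp [List.modifyHead]
      rw [hqs]
      have hlen : 1 ≤ (qsplit m).length := by
        cases hm : qsplit m with
        | nil => exact absurd hm (qsplit_ne_nil m)
        | cons x xs => simp
      rw [if_pos (by simp; omega)]
      congr 1
      rw [slice_one_neg_one, join_qsplit]
      have hcast : (p.length : Int) + 1 = ((p.length + 1 : Nat) : Int) := by push_cast; ring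
      rw [hcast, PySem.Chars.slice_eq_listSlice, PySem.List.slice_natCast,
        show p.length + 1 + m.length - (p.length + 1) = m.length from by omega,
        show p ++ '"' :: (m ++ '"' :: q) = (p ++ ['"']) ++ (m ++ '"' :: q) from by simp]
      have hdrop : List.drop (p.length + 1) ((p ++ ['"']) ++ (m ++ '"' :: q)) = m ++ '"' :: q := by
        rw [show p.length + 1 = (p ++ ['"']).length from by simp]
        exact List.drop_left
      rw [hdrop, show List.take m.length (m ++ '"' :: q) = m from by
        simp]
    · have hf : PySem.Chars.find.go ['"'] (p ++ '"' :: t) 0 = (p.length : Int) := by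
        rw [find_go_append hp _ 0]; simp
      have hi : (p ++ '"' :: t)[p.length]? = some '"' := by
        rw [List.getElem?_append_right (le_refl _)]
        simp
      have hr : PySem.Chars.rfind.go (p ++ '"' :: t) ['"'] (p ++ '"' :: t).length
          = (p.length : Int) := by
        apply rfind_go_found _ _ hi
        · simp
        · intro k hk1 hk2
          rw [hip k hk1]
          exact getElem?_ne_quote h2 _
      rw [hf, hr]
      rw [if_neg (by intro h; exact h.2.2 rfl)]
      have hqs : qsplit (p ++ '"' :: t) = [p, t] := by
        rw [qsplit_append_free hp, show qsplit ('"' :: t) = [] :: qsplit t from by simp [qsplit],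
          qsplit_free h2]
        simp [List.modifyHead]
      rw [hqs, if_neg (by simp)]
  · have hf : PySem.Chars.find.go ['"'] s 0 = -1 := find_go_free h1 0
    rw [hf, if_neg (by intro h; exact h.1 rfl)]
    rw [qsplit_free h1, if_neg (by simp)]

-- ===== VERDICT (by name: the statement is the Claim_ definition above) =====
theorem extract_data_between_quotes_spec : Claim_equal_extract_data_between_quotes := by
  intro lines _
  unfold Spec_extract_data_between_quotes extract_data_between_quotes extract_data_between_quotes_alt
  congr 1
  funext acc line
  exact line_eq acc line
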